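-- pv_equiv track=rewrite | github.com/guanrenyang/SJTU-Course-Notes | CS410-人工智能/Project 1/Dynamic_Programming.py | __triSeqAlign
-- ===== SOURCE A (Python) =====
-- def __triSeqAlign(x: str, y: str, z: str):
--     def forward(DP_table, i, j, k):
--         if i==0 and j==0 and k==0:
--             return
--         elif (i==0 and j==0):
--             DP_table[i][j][k] = DP_table[i][j][k-1] + 4
--         elif (i==0 and k==0):
--             DP_table[i][j][k] = DP_table[i][j-1][k] + 4
--         elif (j==0 and k==0):
--             DP_table[i][j][k] = DP_table[i-1][j][k] + 4
--         elif i==0: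
--             DP_table[i][j][k] = min(DP_table[i][j-1][k-1] + (4 if y[j-1]==z[k-1] else 7),
--                                         min(DP_table[i][j][k-1] + 4, DP_table[i][j-1][k] + 4))
--         elif j==0:
--             DP_table[i][j][k] = min(DP_table[i-1][j][k-1] + (4 if x[i-1]==z[k-1] else 7),
--                                         DP_table[i][j][k-1] + 4, DP_table[i-1][j][k] + 4)
--         elif k==0:
--             DP_table[i][j][k] = min(DP_table[i-1][j-1][k] + (4 if x[i-1]==y[j-1] else 7),
--                                         DP_table[i-1][j][k] + 4, DP_table[i][j-1][k] + 4)
--         else: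
--             if x[i-1]==y[j-1]==z[k-1]:
--                 min_value = [ DP_table[i-1][j-1][k-1],
--                         DP_table[i-1][j-1][k] + 4, DP_table[i-1][j][k-1] + 4, DP_table[i][j-1][k-1] + 4,
--                         DP_table[i][j][k-1] + 4, DP_table[i][j-1][k] + 4, DP_table[i-1][j][k] + 4 ]
--                 min_value.sort()
--                 DP_table[i][j][k] = min_value[0]
--             elif x[i-1]==y[j-1] and x[i-1]!=z[k-1]:
--                 min_value = [ DP_table[i-1][j-1][k-1] + 6,
--                         DP_table[i-1][j-1][k] + 4, DP_table[i-1][j][k-1] + 7, DP_table[i][j-1][k-1] + 7,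
--                         DP_table[i][j][k-1] + 4, DP_table[i][j-1][k] + 4, DP_table[i-1][j][k] + 4 ]
--                 min_value.sort()
--                 DP_table[i][j][k] = min_value[0]
--             elif x[i-1]==z[k-1] and x[i-1]!=y[j-1]:
--                 min_value = [ DP_table[i-1][j-1][k-1] + 6,
--                         DP_table[i-1][j-1][k] + 7, DP_table[i-1][j][k-1] + 4, DP_table[i][j-1][k-1] + 7,
--                         DP_table[i][j][k-1] + 4, DP_table[i][j-1][k] + 4, DP_table[i-1][j][k] + 4 ]
--                 min_value.sort()
--                 DP_table[i][j][k] = min_value[0]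
--             elif y[j-1]==z[k-1] and x[i-1]!=y[j-1]:
--                 min_value = [ DP_table[i-1][j-1][k-1] + 6,
--                         DP_table[i-1][j-1][k] + 7, DP_table[i-1][j][k-1] + 7, DP_table[i][j-1][k-1] + 4,
--                         DP_table[i][j][k-1] + 4, DP_table[i][j-1][k] + 4, DP_table[i-1][j][k] + 4 ]
--                 min_value.sort()
--                 DP_table[i][j][k] = min_value[0]
--             else:
--                 min_value = [ DP_table[i-1][j-1][k-1] + 9,
--                         DP_table[i-1][j-1][k] + 7, DP_table[i-1][j][k-1] + 7, DP_table[i][j-1][k-1] + 7,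
--                         DP_table[i][j][k-1] + 4, DP_table[i][j-1][k] + 4, DP_table[i-1][j][k] + 4 ]
--                 min_value.sort()
--                 DP_table[i][j][k] = min_value[0]
--
--     axis_0, axis_1, axis_2 = len(x), len(y), len(z)
--
--     DP_table =[[[0 for k in range(axis_2+1)] for j in range(axis_1 + 1)]  for i in range(axis_0 + 1)] # create a table for DP
--
--     # with tqdm(total=(axis_0+1)*(axis_1+1)*(axis_2+1)) as pbar:
--     for i in range(0,axis_0+1):
--         for j in range(0, axis_1+1):
--             for k in range(0, axis_2+1):
--                 forward(DP_table, i, j, k)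
--                     # pbar.update(1)
--
--     return DP_table[axis_0][axis_1][axis_2]
-- ===== SOURCE B (Python) =====
-- MOVES = [(1, 1, 1), (1, 1, 0), (1, 0, 1), (0, 1, 1), (0, 0, 1), (0, 1, 0), (1, 0, 0)]
--
--
-- def __triSeqAlign(x: str, y: str, z: str):
--     def move_cost(i, j, k, di, dj, dk):
--         cost = 0
--         if di and dj and x[i - 1] != y[j - 1]:
--             cost += 3
--         if di and dk and x[i - 1] != z[k - 1]:
--             cost += 3
--         if dj and dk and y[j - 1] != z[k - 1]:
--             cost += 3
--         if not (di and dj and dk):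
--             cost += 4
--         return cost
--
--     memo = {}
--
--     def solve(i, j, k):
--         v = memo.get((i, j, k))
--         if v is not None:
--             return v
--         if i == 0 and j == 0 and k == 0:
--             v = 0
--         else:
--             cands = []
--             for di, dj, dk in MOVES:
--                 if di <= i and dj <= j and dk <= k:
--                     cands.append(solve(i - di, j - dj, k - dk)
--                                  + move_cost(i, j, k, di, dj, dk))
--             v = min(cands)
--         memo[(i, j, k)] = v
--         return v
--
--     return solve(len(x), len(y), len(z))
-- ===== Notes on version B (the rewrite author's own statement) =====
-- stated objective: alternative
-- what changed: The bottom-up triple-loop table fill with a ~10-branch boundary/equality cost tower is replaced by top-down memoized recursion from (len(x),len(y),len(z)) over the 7 alignment moves, the column cost of each move computed as 3 per mismatched pair of advancing characters plus 4 for a gap column.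
import Mathlib
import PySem

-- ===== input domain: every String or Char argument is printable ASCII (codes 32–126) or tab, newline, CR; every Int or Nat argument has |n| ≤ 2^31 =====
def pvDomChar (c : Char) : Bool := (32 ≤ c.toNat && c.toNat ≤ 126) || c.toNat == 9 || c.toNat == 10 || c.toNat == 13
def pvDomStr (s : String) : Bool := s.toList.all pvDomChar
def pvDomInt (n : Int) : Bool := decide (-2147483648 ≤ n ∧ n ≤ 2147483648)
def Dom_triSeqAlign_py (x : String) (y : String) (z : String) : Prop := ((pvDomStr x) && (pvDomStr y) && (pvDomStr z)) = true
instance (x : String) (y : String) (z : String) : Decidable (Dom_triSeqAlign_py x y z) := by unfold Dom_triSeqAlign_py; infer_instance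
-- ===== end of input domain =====

-- B replaces A's bottom-up triple-loop table fill (with its ~10-branch boundary/equality
-- cost tower) by top-down memoized recursion over the 7 alignment moves with a computed
-- column cost (objective: alternative decomposition, same O(n·m·k) work).

-- ===== PORT A =====
-- The Python 3-D list DP_table is a nested List; all reads/writes are at in-range non-negative
-- indices, so List.getD / List.set are exact ports of DP_table[i][j][k] read and assignment.
abbrev pvTab : Type := List (List (List Int))

def pvGet (T : pvTab) (i j k : Nat) : Int := ((T.getD i []).getD j []).getD k 0

def pvSet (T : pvTab) (i j k : Nat) (v : Int) : pvTab :=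
  T.set i ((T.getD i []).set j (((T.getD i []).getD j []).set k v))

-- x[i-1] for 1 ≤ i ≤ len(x): in-range non-negative index, ported as List.getD on the char list.
def pvChr (cs : List Char) (i : Nat) : Char := cs.getD (i - 1) ' '

-- 'min_value.sort(); DP[i][j][k] = min_value[0]' : Python list.sort is PySem.List.sorted with
-- identity key; [0] on the (always non-empty) literal 7-list is headI.
def pvSortHead (l : List Int) : Int := (PySem.List.sorted l (fun v => v) false).headI

-- literal transliteration of A's nested 'forward' (the mutation becomes returning the updated table)
def pvForwardA (cx cy cz : List Char) (T : pvTab) (i j k : Nat) : pvTab :=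
  if i = 0 ∧ j = 0 ∧ k = 0 then T
  else if i = 0 ∧ j = 0 then pvSet T i j k (pvGet T i j (k-1) + 4)
  else if i = 0 ∧ k = 0 then pvSet T i j k (pvGet T i (j-1) k + 4)
  else if j = 0 ∧ k = 0 then pvSet T i j k (pvGet T (i-1) j k + 4)
  else if i = 0 then
    pvSet T i j k (min (pvGet T i (j-1) (k-1) + (if pvChr cy j = pvChr cz k then 4 else 7))
                       (min (pvGet T i j (k-1) + 4) (pvGet T i (j-1) k + 4)))
  else if j = 0 then
    pvSet T i j k (min (pvGet T (i-1) j (k-1) + (if pvChr cx i = pvChr cz k then 4 else 7))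
                       (min (pvGet T i j (k-1) + 4) (pvGet T (i-1) j k + 4)))
  else if k = 0 then
    pvSet T i j k (min (pvGet T (i-1) (j-1) k + (if pvChr cx i = pvChr cy j then 4 else 7))
                       (min (pvGet T (i-1) j k + 4) (pvGet T i (j-1) k + 4)))
  else
    if pvChr cx i = pvChr cy j ∧ pvChr cy j = pvChr cz k then
      pvSet T i j k (pvSortHead [ pvGet T (i-1) (j-1) (k-1),
        pvGet T (i-1) (j-1) k + 4, pvGet T (i-1) j (k-1) + 4, pvGet T i (j-1) (k-1) + 4,
        pvGet T i j (k-1) + 4, pvGet T i (j-1) k + 4, pvGet T (i-1) j k + 4 ])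
    else if pvChr cx i = pvChr cy j ∧ pvChr cx i ≠ pvChr cz k then
      pvSet T i j k (pvSortHead [ pvGet T (i-1) (j-1) (k-1) + 6,
        pvGet T (i-1) (j-1) k + 4, pvGet T (i-1) j (k-1) + 7, pvGet T i (j-1) (k-1) + 7,
        pvGet T i j (k-1) + 4, pvGet T i (j-1) k + 4, pvGet T (i-1) j k + 4 ])
    else if pvChr cx i = pvChr cz k ∧ pvChr cx i ≠ pvChr cy j then
      pvSet T i j k (pvSortHead [ pvGet T (i-1) (j-1) (k-1) + 6,
        pvGet T (i-1) (j-1) k + 7, pvGet T (i-1) j (k-1) + 4, pvGet T i (j-1) (k-1) + 7,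
        pvGet T i j (k-1) + 4, pvGet T i (j-1) k + 4, pvGet T (i-1) j k + 4 ])
    else if pvChr cy j = pvChr cz k ∧ pvChr cx i ≠ pvChr cy j then
      pvSet T i j k (pvSortHead [ pvGet T (i-1) (j-1) (k-1) + 6,
        pvGet T (i-1) (j-1) k + 7, pvGet T (i-1) j (k-1) + 7, pvGet T i (j-1) (k-1) + 4,
        pvGet T i j (k-1) + 4, pvGet T i (j-1) k + 4, pvGet T (i-1) j k + 4 ])
    else
      pvSet T i j k (pvSortHead [ pvGet T (i-1) (j-1) (k-1) + 9,
        pvGet T (i-1) (j-1) k + 7, pvGet T (i-1) j (k-1) + 7, pvGet T i (j-1) (k-1) + 7,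
        pvGet T i j (k-1) + 4, pvGet T i (j-1) k + 4, pvGet T (i-1) j k + 4 ])

-- range(0, n+1) over non-negative bounds is ported as List.range (n+1)
def triSeqAlign_py (x : String) (y : String) (z : String) : Int :=
  let cx := x.toList; let cy := y.toList; let cz := z.toList
  let a0 := cx.length; let a1 := cy.length; let a2 := cz.length
  let final := (List.range (a0+1)).foldl (fun T i =>
      (List.range (a1+1)).foldl (fun T j =>
        (List.range (a2+1)).foldl (fun T k => pvForwardA cx cy cz T i j k) T) T)
    (List.replicate (a0+1) (List.replicate (a1+1) (List.replicate (a2+1) (0:Int))))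
  pvGet final a0 a1 a2

-- ===== PORT B =====
-- the module-level MOVES list
def pvMoves : List (Nat × Nat × Nat) := [(1,1,1),(1,1,0),(1,0,1),(0,1,1),(0,0,1),(0,1,0),(1,0,0)]

-- move_cost: the three guarded pair-mismatch additions, then the gap penalty
def pvMoveCost (cx cy cz : List Char) (i j k di dj dk : Nat) : Int :=
  let c0 : Int := 0
  let c1 := if di ≠ 0 ∧ dj ≠ 0 ∧ pvChr cx i ≠ pvChr cy j then c0 + 3 else c0
  let c2 := if di ≠ 0 ∧ dk ≠ 0 ∧ pvChr cx i ≠ pvChr cz k then c1 + 3 else c1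
  let c3 := if dj ≠ 0 ∧ dk ≠ 0 ∧ pvChr cy j ≠ pvChr cz k then c2 + 3 else c2
  if ¬(di ≠ 0 ∧ dj ≠ 0 ∧ dk ≠ 0) then c3 + 4 else c3

-- Python min(cands) on a non-empty list of ints
def pvMinList (l : List Int) : Int :=
  match l with
  | [] => 0          -- unreachable: Python min([]) raises, but cands is never empty off the origin
  | a :: t => t.foldl min a

-- memoized recursive solve; the dict threads through; fuel only makes the recursion
-- structural (fuel = i+j+k+1 at the top always suffices, proved below)
mutual
def pvSolve (cx cy cz : List Char) (fuel : Nat) (memo : PySem.Dict (Nat × Nat × Nat) Int)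
    (i j k : Nat) : Int × PySem.Dict (Nat × Nat × Nat) Int :=
  match fuel with
  | 0 => (0, memo)
  | fuel' + 1 =>
    match memo.get? (i, j, k) with
    | some v => (v, memo)
    | none =>
      if i = 0 ∧ j = 0 ∧ k = 0 then (0, memo.insert (i, j, k) 0)
      else
        let r := pvSolveMoves cx cy cz fuel' memo i j k pvMoves
        let v := pvMinList r.1
        (v, r.2.insert (i, j, k) v)
termination_by (fuel, 0)

-- the 'for di, dj, dk in MOVES: if valid: cands.append(solve(pred) + move_cost(...))' loop
def pvSolveMoves (cx cy cz : List Char) (fuel : Nat) (memo : PySem.Dict (Nat × Nat × Nat) Int)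
    (i j k : Nat) (mvs : List (Nat × Nat × Nat)) : List Int × PySem.Dict (Nat × Nat × Nat) Int :=
  match mvs with
  | [] => ([], memo)
  | (di, dj, dk) :: rest =>
    if di ≤ i ∧ dj ≤ j ∧ dk ≤ k then
      let r := pvSolve cx cy cz fuel memo (i - di) (j - dj) (k - dk)
      let rr := pvSolveMoves cx cy cz fuel r.2 i j k rest
      ((r.1 + pvMoveCost cx cy cz i j k di dj dk) :: rr.1, rr.2)
    else pvSolveMoves cx cy cz fuel memo i j k rest
termination_by (fuel, mvs.length + 1)
end

def triSeqAlign_py_alt (x : String) (y : String) (z : String) : Int :=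
  let cx := x.toList; let cy := y.toList; let cz := z.toList
  (pvSolve cx cy cz (cx.length + cy.length + cz.length + 1) PySem.Dict.empty
    cx.length cy.length cz.length).1

-- ===== PRECONDITION & SPEC =====
def Spec_triSeqAlign_py (x : String) (y : String) (z : String) (out : Int) : Prop := out = triSeqAlign_py_alt x y z
instance (x : String) (y : String) (z : String) (out : Int) : Decidable (Spec_triSeqAlign_py x y z out) := by unfold Spec_triSeqAlign_py; infer_instance

-- ===== CLAIM (what is proved, stated in full; the proofs are below) =====
def Claim_equal_triSeqAlign_py : Prop := ∀ (x : String) (y : String) (z : String), Dom_triSeqAlign_py x y z → Spec_triSeqAlign_py x y z (triSeqAlign_py x y z)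

-- ===== LEMMAS AND PROOFS =====

-- the recurrence both programs compute, as a well-founded recursion on i+j+k
def pvE (cx cy cz : List Char) (i j k : Nat) : Int :=
  if i = 0 ∧ j = 0 ∧ k = 0 then 0
  else pvMinList (
    (if _h1 : 1 ≤ i ∧ 1 ≤ j ∧ 1 ≤ k then [pvE cx cy cz (i-1) (j-1) (k-1) + pvMoveCost cx cy cz i j k 1 1 1] else []) ++
    (if _h2 : 1 ≤ i ∧ 1 ≤ j then [pvE cx cy cz (i-1) (j-1) k + pvMoveCost cx cy cz i j k 1 1 0] else []) ++
    (if _h3 : 1 ≤ i ∧ 1 ≤ k then [pvE cx cy cz (i-1) j (k-1) + pvMoveCost cx cy cz i j k 1 0 1] else []) ++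
    (if _h4 : 1 ≤ j ∧ 1 ≤ k then [pvE cx cy cz i (j-1) (k-1) + pvMoveCost cx cy cz i j k 0 1 1] else []) ++
    (if _h5 : 1 ≤ k then [pvE cx cy cz i j (k-1) + pvMoveCost cx cy cz i j k 0 0 1] else []) ++
    (if _h6 : 1 ≤ j then [pvE cx cy cz i (j-1) k + pvMoveCost cx cy cz i j k 0 1 0] else []) ++
    (if _h7 : 1 ≤ i then [pvE cx cy cz (i-1) j k + pvMoveCost cx cy cz i j k 1 0 0] else []))
termination_by i + j + k
decreasing_by all_goals omega

-- the same cell formula with an arbitrary table-reading function g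
def pvCellWith (cx cy cz : List Char) (i j k : Nat) (g : Nat → Nat → Nat → Int) : Int :=
  if i = 0 ∧ j = 0 ∧ k = 0 then 0
  else pvMinList (
    (if 1 ≤ i ∧ 1 ≤ j ∧ 1 ≤ k then [g (i-1) (j-1) (k-1) + pvMoveCost cx cy cz i j k 1 1 1] else []) ++
    (if 1 ≤ i ∧ 1 ≤ j then [g (i-1) (j-1) k + pvMoveCost cx cy cz i j k 1 1 0] else []) ++
    (if 1 ≤ i ∧ 1 ≤ k then [g (i-1) j (k-1) + pvMoveCost cx cy cz i j k 1 0 1] else []) ++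
    (if 1 ≤ j ∧ 1 ≤ k then [g i (j-1) (k-1) + pvMoveCost cx cy cz i j k 0 1 1] else []) ++
    (if 1 ≤ k then [g i j (k-1) + pvMoveCost cx cy cz i j k 0 0 1] else []) ++
    (if 1 ≤ j then [g i (j-1) k + pvMoveCost cx cy cz i j k 0 1 0] else []) ++
    (if 1 ≤ i then [g (i-1) j k + pvMoveCost cx cy cz i j k 1 0 0] else []))

theorem pvE_eq (cx cy cz : List Char) (i j k : Nat) :
    pvE cx cy cz i j k = pvCellWith cx cy cz i j k (pvE cx cy cz) := by
  rw [pvE, pvCellWith]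
  simp only [dite_eq_ite]

theorem pvCellWith_congr (cx cy cz : List Char) (i j k : Nat) (g g' : Nat → Nat → Nat → Int)
    (hg : ∀ a b c, a ≤ i → b ≤ j → c ≤ k → a + b + c < i + j + k → g a b c = g' a b c) :
    pvCellWith cx cy cz i j k g = pvCellWith cx cy cz i j k g' := by
  unfold pvCellWith
  have e1 : (if 1 ≤ i ∧ 1 ≤ j ∧ 1 ≤ k then [g (i-1) (j-1) (k-1) + pvMoveCost cx cy cz i j k 1 1 1] else [])
      = (if 1 ≤ i ∧ 1 ≤ j ∧ 1 ≤ k then [g' (i-1) (j-1) (k-1) + pvMoveCost cx cy cz i j k 1 1 1] else []) := by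
    split_ifs with h
    · rw [hg _ _ _ (by omega) (by omega) (by omega) (by omega)]
    · rfl
  have e2 : (if 1 ≤ i ∧ 1 ≤ j then [g (i-1) (j-1) k + pvMoveCost cx cy cz i j k 1 1 0] else [])
      = (if 1 ≤ i ∧ 1 ≤ j then [g' (i-1) (j-1) k + pvMoveCost cx cy cz i j k 1 1 0] else []) := by
    split_ifs with h
    · rw [hg _ _ _ (by omega) (by omega) (by omega) (by omega)]
    · rfl
  have e3 : (if 1 ≤ i ∧ 1 ≤ k then [g (i-1) j (k-1) + pvMoveCost cx cy cz i j k 1 0 1] else [])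
      = (if 1 ≤ i ∧ 1 ≤ k then [g' (i-1) j (k-1) + pvMoveCost cx cy cz i j k 1 0 1] else []) := by
    split_ifs with h
    · rw [hg _ _ _ (by omega) (by omega) (by omega) (by omega)]
    · rfl
  have e4 : (if 1 ≤ j ∧ 1 ≤ k then [g i (j-1) (k-1) + pvMoveCost cx cy cz i j k 0 1 1] else [])
      = (if 1 ≤ j ∧ 1 ≤ k then [g' i (j-1) (k-1) + pvMoveCost cx cy cz i j k 0 1 1] else []) := by
    split_ifs with h
    · rw [hg _ _ _ (by omega) (by omega) (by omega) (by omega)]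
    · rfl
  have e5 : (if 1 ≤ k then [g i j (k-1) + pvMoveCost cx cy cz i j k 0 0 1] else [])
      = (if 1 ≤ k then [g' i j (k-1) + pvMoveCost cx cy cz i j k 0 0 1] else []) := by
    split_ifs with h
    · rw [hg _ _ _ (by omega) (by omega) (by omega) (by omega)]
    · rfl
  have e6 : (if 1 ≤ j then [g i (j-1) k + pvMoveCost cx cy cz i j k 0 1 0] else [])
      = (if 1 ≤ j then [g' i (j-1) k + pvMoveCost cx cy cz i j k 0 1 0] else []) := by
    split_ifs with h
    · rw [hg _ _ _ (by omega) (by omega) (by omega) (by omega)]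
    · rfl
  have e7 : (if 1 ≤ i then [g (i-1) j k + pvMoveCost cx cy cz i j k 1 0 0] else [])
      = (if 1 ≤ i then [g' (i-1) j k + pvMoveCost cx cy cz i j k 1 0 0] else []) := by
    split_ifs with h
    · rw [hg _ _ _ (by omega) (by omega) (by omega) (by omega)]
    · rfl
  rw [e1, e2, e3, e4, e5, e6, e7]



theorem cost100 (cx cy cz : List Char) (i j k : Nat) :
    pvMoveCost cx cy cz i j k 1 0 0 = 4 := by
  simp [pvMoveCost]
theorem cost010 (cx cy cz : List Char) (i j k : Nat) :
    pvMoveCost cx cy cz i j k 0 1 0 = 4 := by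
  simp [pvMoveCost]
theorem cost001 (cx cy cz : List Char) (i j k : Nat) :
    pvMoveCost cx cy cz i j k 0 0 1 = 4 := by
  simp [pvMoveCost]
theorem cost110 (cx cy cz : List Char) (i j k : Nat) :
    pvMoveCost cx cy cz i j k 1 1 0 = (if pvChr cx i = pvChr cy j then 4 else 7) := by
  simp only [pvMoveCost]
  split_ifs <;> simp_all <;> omega
theorem cost101 (cx cy cz : List Char) (i j k : Nat) :
    pvMoveCost cx cy cz i j k 1 0 1 = (if pvChr cx i = pvChr cz k then 4 else 7) := by
  simp only [pvMoveCost]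
  split_ifs <;> simp_all <;> omega
theorem cost011 (cx cy cz : List Char) (i j k : Nat) :
    pvMoveCost cx cy cz i j k 0 1 1 = (if pvChr cy j = pvChr cz k then 4 else 7) := by
  simp only [pvMoveCost]
  split_ifs <;> simp_all <;> omega
theorem cost111 (cx cy cz : List Char) (i j k : Nat) :
    pvMoveCost cx cy cz i j k 1 1 1 =
      3 * ((if pvChr cx i = pvChr cy j then 0 else 1) + (if pvChr cx i = pvChr cz k then 0 else 1)
           + (if pvChr cy j = pvChr cz k then 0 else 1)) := by
  simp only [pvMoveCost]
  split_ifs <;> simp_all <;> omega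
theorem pvMinMem (m : Int) : ∀ (t : List Int) (a : Int), (∀ y ∈ a :: t, m ≤ y) → m ∈ a :: t → t.foldl min a = m := by
  intro t
  induction t with
  | nil => intro a h hm; simp at hm ⊢; have := h a (by simp); omega
  | cons b t ih =>
    intro a h hm
    simp only [List.foldl_cons]
    apply ih
    · intro y hy
      rcases List.mem_cons.mp hy with h1 | h1
      · subst h1; have ha := h a (by simp); have hb := h b (by simp); omega
      · exact h y (by simp [h1])
    · rcases List.mem_cons.mp hm with h1 | h1
      · refine List.mem_cons.mpr (Or.inl ?_)
        have ha := h a (by simp); have hb := h b (by simp); omega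
      · rcases List.mem_cons.mp h1 with h2 | h2
        · refine List.mem_cons.mpr (Or.inl ?_)
          have ha := h a (by simp); have hb := h b (by simp); omega
        · exact List.mem_cons.mpr (Or.inr h2)

theorem pvSortHead_min (a : Int) (t : List Int) :
    pvSortHead (a :: t) = pvMinList (a :: t) := by
  unfold pvSortHead pvMinList
  obtain ⟨m, s, hs⟩ : ∃ m s, PySem.List.sorted (a :: t) (fun v => v) false = m :: s := by
    rcases h : PySem.List.sorted (a :: t) (fun v => v) false with _ | ⟨m, s⟩
    · exact absurd h (by simp [PySem.List.sorted_eq_nil_iff])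
    · exact ⟨m, s, rfl⟩
  rw [hs]
  have hle := PySem.List.key_head_sorted_le (xs := a :: t) (key := fun v => v) hs
  have hmem : m ∈ a :: t := by
    have := PySem.List.mem_sorted (xs := a :: t) (key := fun v => v) (rev := false) (x := m)
    rw [hs] at this; exact this.mp (by simp)
  simp only [List.headI]
  exact (pvMinMem m t a hle hmem).symm

set_option maxHeartbeats 1000000 in
theorem pvForwardA_eq_cell (cx cy cz : List Char) (T : pvTab) (i j k : Nat) :
    pvForwardA cx cy cz T i j k =
      if i = 0 ∧ j = 0 ∧ k = 0 then T
      else pvSet T i j k (pvCellWith cx cy cz i j k (pvGet T)) := by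
  unfold pvForwardA pvCellWith
  rcases i with _ | i <;> rcases j with _ | j <;> rcases k with _ | k
  · rfl
  · simp [cost001, pvMinList]
  · simp [cost010, pvMinList]
  · -- (0, j+1, k+1)
    by_cases e : pvChr cy (j+1) = pvChr cz (k+1) <;>
      simp [e, cost011, cost001, cost010, pvMinList, min_assoc]
  · simp [cost100, pvMinList]
  · -- (i+1, 0, k+1)
    by_cases e : pvChr cx (i+1) = pvChr cz (k+1) <;>
      simp [e, cost101, cost001, cost100, pvMinList]
  · -- (i+1, j+1, 0)
    by_cases e : pvChr cx (i+1) = pvChr cy (j+1) <;>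
      (simp [e, cost110, cost010, cost100, pvMinList]
       rw [min_comm (pvGet T i (j+1) 0) (pvGet T (i+1) j 0)])
  · -- interior
    have e1' : (pvChr cy (j+1) = pvChr cx (i+1)) ↔ (pvChr cx (i+1) = pvChr cy (j+1)) := eq_comm
    have e2' : (pvChr cz (k+1) = pvChr cx (i+1)) ↔ (pvChr cx (i+1) = pvChr cz (k+1)) := eq_comm
    have e3' : (pvChr cz (k+1) = pvChr cy (j+1)) ↔ (pvChr cy (j+1) = pvChr cz (k+1)) := eq_comm
    by_cases e1 : pvChr cx (i+1) = pvChr cy (j+1) <;>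
      by_cases e2 : pvChr cx (i+1) = pvChr cz (k+1) <;>
      by_cases e3 : pvChr cy (j+1) = pvChr cz (k+1) <;>
      first
        | exact absurd (e1.symm.trans e2) e3
        | exact absurd (e1.trans e3) e2
        | exact absurd (e2.trans e3.symm) e1
        | (simp [e1', e2', e3', e1, e2, e3, pvSortHead_min, cost111, cost110, cost101, cost011,
                 cost001, cost010, cost100, pvMinList]
           try (congr 1; omega))


theorem pvGetD_set_self {α : Type} (l : List α) (i : Nat) (x d : α) (h : i < l.length) :
    (l.set i x).getD i d = x := by
  simp [List.getD_eq_getElem?_getD, List.getElem?_set_self, h]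

theorem pvGetD_set_ne {α : Type} (l : List α) (i j : Nat) (x d : α) (h : j ≠ i) :
    (l.set i x).getD j d = l.getD j d := by
  simp [List.getD_eq_getElem?_getD, List.getElem?_set_ne (Ne.symm h)]

theorem pvGetD_mem {α : Type} (l : List α) (i : Nat) (d : α) (h : i < l.length) :
    l.getD i d ∈ l := by
  rw [List.getD_eq_getElem?_getD, List.getElem?_eq_getElem h]
  exact Option.getD_some ▸ List.getElem_mem h

def pvShape (T : pvTab) (n m p : Nat) : Prop :=
  T.length = n + 1 ∧ (∀ r ∈ T, r.length = m + 1 ∧ ∀ q ∈ r, q.length = p + 1)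

theorem pvShape_init (n m p : Nat) :
    pvShape (List.replicate (n+1) (List.replicate (m+1) (List.replicate (p+1) (0:Int)))) n m p := by
  refine ⟨by simp, ?_⟩
  intro r hr
  rw [List.eq_of_mem_replicate hr]
  refine ⟨by simp, ?_⟩
  intro q hq; rw [List.eq_of_mem_replicate hq]; simp

theorem pvShape_set (T : pvTab) (n m p a b c : Nat) (v : Int) (hT : pvShape T n m p)
    (ha : a ≤ n) (hb : b ≤ m) : pvShape (pvSet T a b c v) n m p := by
  obtain ⟨h1, h2⟩ := hT
  have haT : a < T.length := by omega
  have hrow := h2 _ (pvGetD_mem T a [] haT)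
  have hbR : b < (T.getD a []).length := by omega
  have hq := hrow.2 _ (pvGetD_mem _ b [] hbR)
  refine ⟨by simp [pvSet, h1], ?_⟩
  intro r hr
  rcases List.mem_or_eq_of_mem_set hr with h | h
  · exact h2 r h
  · subst h
    refine ⟨by simp [← List.getD_eq_getElem?_getD, hrow.1], ?_⟩
    intro q hqm
    rcases List.mem_or_eq_of_mem_set hqm with h' | h'
    · exact hrow.2 q h'
    · subst h'; simp [← List.getD_eq_getElem?_getD, hq]

theorem pvGet_set_self (T : pvTab) (n m p a b c : Nat) (v : Int) (hT : pvShape T n m p)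
    (ha : a ≤ n) (hb : b ≤ m) (hc : c ≤ p) :
    pvGet (pvSet T a b c v) a b c = v := by
  obtain ⟨h1, h2⟩ := hT
  have haT : a < T.length := by omega
  have hrow := h2 _ (pvGetD_mem T a [] haT)
  have hbR : b < (T.getD a []).length := by omega
  have hq := hrow.2 _ (pvGetD_mem _ b [] hbR)
  have hcl : c < ((T.getD a []).getD b []).length := by omega
  unfold pvGet pvSet
  rw [pvGetD_set_self _ _ _ _ haT, pvGetD_set_self _ _ _ _ hbR, pvGetD_set_self _ _ _ _ hcl]

theorem pvGet_set_ne (T : pvTab) (a b c a' b' c' : Nat) (v : Int)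
    (h : ¬(a' = a ∧ b' = b ∧ c' = c)) :
    pvGet (pvSet T a b c v) a' b' c' = pvGet T a' b' c' := by
  unfold pvGet pvSet
  by_cases h1 : a' = a
  · subst h1
    by_cases ha : a' < T.length
    · rw [pvGetD_set_self _ _ _ _ ha]
      by_cases h2 : b' = b
      · subst h2
        by_cases hb : b' < (T.getD a' []).length
        · rw [pvGetD_set_self _ _ _ _ hb]
          rw [pvGetD_set_ne _ _ _ _ _ (by tauto)]
        · rw [List.set_eq_of_length_le (by omega)]
      · rw [pvGetD_set_ne _ _ _ _ _ h2]
    · rw [List.set_eq_of_length_le (by omega)]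
  · rw [pvGetD_set_ne _ _ _ _ _ h1]

def pvLt (i j t a b c : Nat) : Prop := a < i ∨ (a = i ∧ b < j) ∨ (a = i ∧ b = j ∧ c < t)

def pvInv (cx cy cz : List Char) (T : pvTab) (S : Nat → Nat → Nat → Prop) : Prop :=
  pvShape T cx.length cy.length cz.length ∧ pvGet T 0 0 0 = 0 ∧
  ∀ a b c, a ≤ cx.length → b ≤ cy.length → c ≤ cz.length → S a b c →
    pvGet T a b c = pvE cx cy cz a b c

theorem pvE_origin (cx cy cz : List Char) : pvE cx cy cz 0 0 0 = 0 := by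
  rw [pvE]; simp

theorem pvInv_mono (cx cy cz : List Char) (T : pvTab) (S S' : Nat → Nat → Nat → Prop)
    (hss : ∀ a b c, a ≤ cx.length → b ≤ cy.length → c ≤ cz.length → S' a b c → S a b c)
    (h : pvInv cx cy cz T S) : pvInv cx cy cz T S' :=
  ⟨h.1, h.2.1, fun a b c ha hb hc hs => h.2.2 a b c ha hb hc (hss a b c ha hb hc hs)⟩

theorem pvStep (cx cy cz : List Char) (T : pvTab) (i j t : Nat)
    (hi : i ≤ cx.length) (hj : j ≤ cy.length) (ht : t ≤ cz.length)
    (h : pvInv cx cy cz T (pvLt i j t)) :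
    pvInv cx cy cz (pvForwardA cx cy cz T i j t) (pvLt i j (t+1)) := by
  rw [pvForwardA_eq_cell]
  by_cases h0 : i = 0 ∧ j = 0 ∧ t = 0
  · rw [if_pos h0]
    refine ⟨h.1, h.2.1, ?_⟩
    intro a b c ha hb hc hs
    obtain ⟨hi0, hj0, ht0⟩ := h0; subst hi0; subst hj0; subst ht0
    have : a = 0 ∧ b = 0 ∧ c = 0 := by unfold pvLt at hs; omega
    obtain ⟨rfl, rfl, rfl⟩ := this
    rw [pvE_origin]; exact h.2.1
  · rw [if_neg h0]
    have hV : pvCellWith cx cy cz i j t (pvGet T) = pvE cx cy cz i j t := by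
      rw [pvCellWith_congr cx cy cz i j t (pvGet T) (pvE cx cy cz) ?_, ← pvE_eq]
      intro a b c ha hb hc hlt
      exact h.2.2 a b c (by omega) (by omega) (by omega) (by unfold pvLt; omega)
    refine ⟨pvShape_set _ _ _ _ _ _ _ _ h.1 hi hj, ?_, ?_⟩
    · rw [pvGet_set_ne _ _ _ _ _ _ _ _ (by omega)]
      exact h.2.1
    · intro a b c ha hb hc hs
      by_cases heq : a = i ∧ b = j ∧ c = t
      · obtain ⟨rfl, rfl, rfl⟩ := heq
        rw [pvGet_set_self _ _ _ _ _ _ _ _ h.1 hi hj ht]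
        exact hV
      · rw [pvGet_set_ne _ _ _ _ _ _ _ _ heq]
        exact h.2.2 a b c ha hb hc (by unfold pvLt at hs ⊢; omega)

theorem pvInner (cx cy cz : List Char) (i j : Nat) (hi : i ≤ cx.length) (hj : j ≤ cy.length) :
    ∀ t, t ≤ cz.length + 1 → ∀ T, pvInv cx cy cz T (pvLt i j 0) →
      pvInv cx cy cz ((List.range t).foldl (fun T k => pvForwardA cx cy cz T i j k) T) (pvLt i j t) := by
  intro t
  induction t with
  | zero => intro _ T h; simpa using h
  | succ t ih =>
    intro ht T h
    rw [List.range_succ, List.foldl_append]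
    exact pvStep cx cy cz _ i j t hi hj (by omega) (ih (by omega) T h)

theorem pvMid (cx cy cz : List Char) (i : Nat) (hi : i ≤ cx.length) :
    ∀ jt, jt ≤ cy.length + 1 → ∀ T, pvInv cx cy cz T (pvLt i 0 0) →
      pvInv cx cy cz ((List.range jt).foldl (fun T j =>
          (List.range (cz.length+1)).foldl (fun T k => pvForwardA cx cy cz T i j k) T) T)
        (pvLt i jt 0) := by
  intro jt
  induction jt with
  | zero => intro _ T h; simpa using h
  | succ jt ih =>
    intro hjt T h
    rw [List.range_succ (n := jt), List.foldl_append]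
    simp only [List.foldl_cons, List.foldl_nil]
    have hone := pvInner cx cy cz i jt hi (by omega) (cz.length+1) (by omega) _ (ih (by omega) T h)
    exact pvInv_mono cx cy cz _ _ _ (by intro a b c _ _ _ hs; unfold pvLt at hs ⊢; omega) hone

theorem pvOuter (cx cy cz : List Char) :
    ∀ it, it ≤ cx.length + 1 → ∀ T, pvInv cx cy cz T (pvLt 0 0 0) →
      pvInv cx cy cz ((List.range it).foldl (fun T i =>
          (List.range (cy.length+1)).foldl (fun T j =>
            (List.range (cz.length+1)).foldl (fun T k => pvForwardA cx cy cz T i j k) T) T) T)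
        (pvLt it 0 0) := by
  intro it
  induction it with
  | zero => intro _ T h; simpa using h
  | succ it ih =>
    intro hit T h
    rw [List.range_succ (n := it), List.foldl_append]
    simp only [List.foldl_cons, List.foldl_nil]
    have hone := pvMid cx cy cz it (by omega) (cy.length+1) (by omega) _ (ih (by omega) T h)
    exact pvInv_mono cx cy cz _ _ _ (by intro a b c _ _ _ hs; unfold pvLt at hs ⊢; omega) hone

theorem pvInit (cx cy cz : List Char) :
    pvInv cx cy cz (List.replicate (cx.length+1) (List.replicate (cy.length+1)
      (List.replicate (cz.length+1) (0:Int)))) (pvLt 0 0 0) := by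
  refine ⟨pvShape_init _ _ _, ?_, ?_⟩
  · simp [pvGet, List.getD_eq_getElem?_getD, List.getElem?_replicate]
  · intro a b c _ _ _ hs; unfold pvLt at hs; omega

theorem triSeqAlignA_eq (x y z : String) :
    triSeqAlign_py x y z = pvE x.toList y.toList z.toList x.toList.length y.toList.length z.toList.length := by
  unfold triSeqAlign_py
  have := pvOuter x.toList y.toList z.toList (x.toList.length + 1) (by omega) _
    (pvInit x.toList y.toList z.toList)
  exact this.2.2 _ _ _ (by omega) (by omega) (by omega) (by unfold pvLt; omega)

def pvMemoInv (cx cy cz : List Char) (memo : PySem.Dict (Nat × Nat × Nat) Int) : Prop :=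
  ∀ a b c v, memo.get? (a, b, c) = some v → v = pvE cx cy cz a b c

theorem pvMemoInv_empty (cx cy cz : List Char) : pvMemoInv cx cy cz PySem.Dict.empty := by
  intro a b c v hv
  simp [PySem.Dict.empty, PySem.Dict.get?] at hv

theorem pvMemoInv_insert (cx cy cz : List Char) (memo : PySem.Dict (Nat × Nat × Nat) Int)
    (i j k : Nat) (v : Int) (hm : pvMemoInv cx cy cz memo) (hv : v = pvE cx cy cz i j k) :
    pvMemoInv cx cy cz (memo.insert (i, j, k) v) := by
  intro a b c w hw
  rw [PySem.Dict.get?_insert] at hw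
  split_ifs at hw with h
  · obtain ⟨rfl, rfl, rfl⟩ := Prod.mk.injEq .. ▸ h
    · simp at hw; omega
  · exact hm a b c w hw

set_option maxHeartbeats 1000000 in
theorem pvFilterMap_eq (cx cy cz : List Char) (i j k : Nat) (g : Nat → Nat → Nat → Int) :
    (pvMoves.filter (fun mv => decide (mv.1 ≤ i ∧ mv.2.1 ≤ j ∧ mv.2.2 ≤ k))).map
      (fun mv => g (i - mv.1) (j - mv.2.1) (k - mv.2.2) + pvMoveCost cx cy cz i j k mv.1 mv.2.1 mv.2.2)
    = (if 1 ≤ i ∧ 1 ≤ j ∧ 1 ≤ k then [g (i-1) (j-1) (k-1) + pvMoveCost cx cy cz i j k 1 1 1] else []) ++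
      (if 1 ≤ i ∧ 1 ≤ j then [g (i-1) (j-1) k + pvMoveCost cx cy cz i j k 1 1 0] else []) ++
      (if 1 ≤ i ∧ 1 ≤ k then [g (i-1) j (k-1) + pvMoveCost cx cy cz i j k 1 0 1] else []) ++
      (if 1 ≤ j ∧ 1 ≤ k then [g i (j-1) (k-1) + pvMoveCost cx cy cz i j k 0 1 1] else []) ++
      (if 1 ≤ k then [g i j (k-1) + pvMoveCost cx cy cz i j k 0 0 1] else []) ++
      (if 1 ≤ j then [g i (j-1) k + pvMoveCost cx cy cz i j k 0 1 0] else []) ++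
      (if 1 ≤ i then [g (i-1) j k + pvMoveCost cx cy cz i j k 1 0 0] else []) := by
  simp only [pvMoves, List.filter_cons, List.filter_nil, decide_eq_true_eq]
  norm_num
  split_ifs <;> simp_all <;> omega

theorem pvSolveMoves_correct (cx cy cz : List Char) (fuel i j k : Nat)
    (HS : ∀ a b c m', a + b + c < fuel → pvMemoInv cx cy cz m' →
      (pvSolve cx cy cz fuel m' a b c).1 = pvE cx cy cz a b c ∧
      pvMemoInv cx cy cz (pvSolve cx cy cz fuel m' a b c).2)
    (hf : i + j + k ≤ fuel) :
    ∀ mvs, (∀ mv ∈ mvs, 1 ≤ mv.1 + mv.2.1 + mv.2.2) →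
    ∀ memo, pvMemoInv cx cy cz memo →
      (pvSolveMoves cx cy cz fuel memo i j k mvs).1 =
        (mvs.filter (fun mv => decide (mv.1 ≤ i ∧ mv.2.1 ≤ j ∧ mv.2.2 ≤ k))).map
          (fun mv => pvE cx cy cz (i - mv.1) (j - mv.2.1) (k - mv.2.2) +
            pvMoveCost cx cy cz i j k mv.1 mv.2.1 mv.2.2)
      ∧ pvMemoInv cx cy cz (pvSolveMoves cx cy cz fuel memo i j k mvs).2 := by
  intro mvs
  induction mvs with
  | nil => intro _ memo hm; simp [pvSolveMoves]; exact hm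
  | cons mv rest ih =>
    intro hnz memo hm
    obtain ⟨di, dj, dk⟩ := mv
    rw [pvSolveMoves]
    split_ifs with hvalid
    · have hlt : (i - di) + (j - dj) + (k - dk) < fuel := by
        have := hnz (di, dj, dk) (by simp); simp at this; omega
      obtain ⟨hr1, hr2⟩ := HS (i - di) (j - dj) (k - dk) memo hlt hm
      obtain ⟨hrr1, hrr2⟩ := ih (fun m hm' => hnz m (by simp [hm'])) _ hr2
      refine ⟨?_, hrr2⟩
      simp only [List.filter_cons, List.map_cons]
      rw [if_pos (by simpa using hvalid)]
      simp [hrr1, hr1]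
    · obtain ⟨hrr1, hrr2⟩ := ih (fun m hm' => hnz m (by simp [hm'])) memo hm
      refine ⟨?_, hrr2⟩
      simp only [List.filter_cons]
      rw [if_neg (by simpa using hvalid)]
      exact hrr1

theorem pvSolve_correct (cx cy cz : List Char) :
    ∀ fuel i j k memo, i + j + k < fuel → pvMemoInv cx cy cz memo →
      (pvSolve cx cy cz fuel memo i j k).1 = pvE cx cy cz i j k ∧
      pvMemoInv cx cy cz (pvSolve cx cy cz fuel memo i j k).2 := by
  intro fuel
  induction fuel with
  | zero => intro i j k memo h; omega
  | succ fuel ih =>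
    intro i j k memo hlt hm
    rw [pvSolve]
    rcases hg : memo.get? (i, j, k) with _ | v
    · simp only []
      split_ifs with h0
      · obtain ⟨rfl, rfl, rfl⟩ := h0
        exact ⟨(pvE_origin cx cy cz).symm, pvMemoInv_insert _ _ _ _ _ _ _ _ hm (pvE_origin cx cy cz).symm⟩
      · have hmoves : ∀ mv ∈ pvMoves, 1 ≤ mv.1 + mv.2.1 + mv.2.2 := by decide
        obtain ⟨h1, h2⟩ := pvSolveMoves_correct cx cy cz fuel i j k
          (fun a b c m' hab hmm => ih a b c m' hab hmm) (by omega) pvMoves hmoves memo hm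
        have hv : pvMinList (pvSolveMoves cx cy cz fuel memo i j k pvMoves).1 = pvE cx cy cz i j k := by
          rw [h1, pvFilterMap_eq]
          conv_rhs => rw [pvE_eq, pvCellWith]
          rw [if_neg h0]
        exact ⟨hv, pvMemoInv_insert _ _ _ _ _ _ _ _ h2 hv⟩
    · simp only []
      exact ⟨hm i j k v hg, hm⟩

theorem triSeqAlignB_eq (x y z : String) :
    triSeqAlign_py_alt x y z =
      pvE x.toList y.toList z.toList x.toList.length y.toList.length z.toList.length := by
  unfold triSeqAlign_py_alt
  exact (pvSolve_correct x.toList y.toList z.toList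
    (x.toList.length + y.toList.length + z.toList.length + 1)
    x.toList.length y.toList.length z.toList.length PySem.Dict.empty (by omega)
    (pvMemoInv_empty _ _ _)).1

-- ===== VERDICT (by name: the statement is the Claim_ definition above) =====
theorem triSeqAlign_py_spec : Claim_equal_triSeqAlign_py := by
  intro x y z _
  unfold Spec_triSeqAlign_py
  rw [triSeqAlignA_eq, triSeqAlignB_eq]
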